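-- pv_equiv track=rewrite | github.com/djeada/Nauka-Programowania | src/python/14_funkcje_wielomiany/zad05.py | pochodna
-- ===== SOURCE A (Python) =====
-- def pochodna(wielomian, k):
--     """
--     Funkcja oblicza k-ta pochodna wielomianu.
--
--     Złożoność czasowa: O(k * n), gdzie n to stopień wielomianu
--     Złożoność pamięciowa: O(n) dla wyniku
--     """
--     if not wielomian or k < 0:
--         return [0]
--
--     wynik = wielomian[:]
--
--     for _ in range(k):
--         if len(wynik) <= 1:
--             wynik = [0]
--             break
--
--         nowy_wynik = []
--         n = len(wynik)
--         for i in range(n - 1):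
--             nowy_wynik.append(wynik[i] * (n - i - 1))
--         wynik = nowy_wynik
--
--     return wynik if wynik else [0]
-- ===== SOURCE B (Python) =====
-- def pochodna(wielomian, k):
--     """k-th derivative in one pass: each coefficient times the falling
--     factorial of its degree, maintained by a rolling exact update."""
--     if not wielomian or k < 0:
--         return [0]
--     n = len(wielomian)
--     if k >= n:
--         return [0]
--     f = 1
--     for j in range(n - k, n):
--         f *= j
--     wynik = []
--     d = n - 1
--     for c in wielomian[:n - k]:
--         wynik.append(c * f)
--         if d > k:
--             f = f * (d - k) // d
--         d -= 1
--     return wynik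
-- ===== Notes on version B (the rewrite author's own statement) =====
-- stated objective: faster
-- what changed: Replaces A's k successive differentiation passes (rebuilding the coefficient list each time) by a single pass that multiplies each coefficient by the falling factorial of its degree, maintained with a rolling exact product update.
import Mathlib
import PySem

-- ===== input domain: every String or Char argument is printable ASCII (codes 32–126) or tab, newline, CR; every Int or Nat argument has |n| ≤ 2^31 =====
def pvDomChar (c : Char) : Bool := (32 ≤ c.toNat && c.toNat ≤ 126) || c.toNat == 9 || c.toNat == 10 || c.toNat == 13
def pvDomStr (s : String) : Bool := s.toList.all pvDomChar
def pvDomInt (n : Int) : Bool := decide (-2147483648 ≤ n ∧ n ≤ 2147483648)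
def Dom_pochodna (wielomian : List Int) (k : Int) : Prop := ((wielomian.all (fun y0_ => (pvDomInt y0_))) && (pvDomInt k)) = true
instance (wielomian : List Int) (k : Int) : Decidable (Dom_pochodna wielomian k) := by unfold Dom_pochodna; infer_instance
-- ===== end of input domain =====

-- B replaces A's k differentiation passes by one pass multiplying each coefficient
-- by the falling factorial of its degree (rolling exact update); objective: faster.

-- ===== PORT A =====
-- inner loop: nowy_wynik.append(wynik[i] * (n - i - 1)) for i in range(n - 1)
-- (index i < n - 1 is always in range, so wynik[i]! is exact here)
def pochodnaStep (wynik : List Int) : List Int :=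
  (List.range (wynik.length - 1)).map
    (fun (i : Nat) => wynik[i]! * ((wynik.length : Int) - (i : Int) - 1))

-- 'for _ in range(k)' with the 'break' (which yields [0] and ends the loop)
def pochodnaLoop : List Int → Nat → List Int
  | wynik, 0 => wynik
  | wynik, k + 1 =>
    if wynik.length ≤ 1 then [0]
    else pochodnaLoop (pochodnaStep wynik) k

def pochodna (wielomian : List Int) (k : Int) : List Int :=
  if wielomian = [] ∨ k < 0 then [0]
  else
    let wynik := pochodnaLoop wielomian k.toNat
    if wynik = [] then [0] else wynik

-- ===== PORT B =====
def pochodna_alt (wielomian : List Int) (k : Int) : List Int :=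
  if wielomian = [] ∨ k < 0 then [0]
  else if (wielomian.length : Int) ≤ k then [0]
  else
    -- one pass over wielomian[:n-k]; state (wynik, f, d), f starts as (n-k)*...*(n-1)
    ((PySem.List.slice wielomian none (some ((wielomian.length : Int) - k))).foldl
      (fun (st : List Int × Int × Int) c =>
        (st.1 ++ [c * st.2.1],
         (if st.2.2 > k then PySem.Int.floordiv (st.2.1 * (st.2.2 - k)) st.2.2 else st.2.1),
         st.2.2 - 1))
      ([],
       (PySem.List.pyRange ((wielomian.length : Int) - k) (wielomian.length : Int) 1).foldl
         (fun f j => f * j) 1,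
       (wielomian.length : Int) - 1)).1

-- ===== PRECONDITION & SPEC =====
def Spec_pochodna (wielomian : List Int) (k : Int) (out : List Int) : Prop := out = pochodna_alt wielomian k
instance (wielomian : List Int) (k : Int) (out : List Int) : Decidable (Spec_pochodna wielomian k out) := by unfold Spec_pochodna; infer_instance

-- ===== CLAIM (what is proved, stated in full; the proofs are below) =====
def Claim_equal_pochodna : Prop := ∀ (wielomian : List Int) (k : Int), Dom_pochodna wielomian k → Spec_pochodna wielomian k (pochodna wielomian k)

-- ===== LEMMAS AND PROOFS =====

-- falling factorial d * (d-1) * ... * (d-k+1), as an Int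
def ff : Nat → Nat → Int
  | _, 0 => 1
  | d, k + 1 => (d : Int) * ff (d - 1) k

theorem ff_bot (k : Nat) : ∀ d : Nat, k ≤ d → ff d (k + 1) = ff d k * ((d : Int) - k) := by
  induction k with
  | zero => intro d _; simp [ff]
  | succ k ih =>
    intro d hk
    have hd1 : k ≤ d - 1 := by omega
    have : ff d (k + 2) = (d : Int) * ff (d - 1) (k + 1) := rfl
    rw [this, ih (d - 1) hd1]
    have hcast : ((d - 1 : Nat) : Int) = (d : Int) - 1 := by omega
    rw [hcast]
    show (d : Int) * (ff (d - 1) k * ((d : Int) - 1 - k)) = (d : Int) * ff (d - 1) k * ((d : Int) - (k + 1))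
    ring

theorem step_getElem! (w : List Int) (i : Nat) (h : i < w.length - 1) :
    (pochodnaStep w)[i]! = w[i]! * ((w.length : Int) - (i : Int) - 1) := by
  have hiw : i < w.length := by omega
  simp [pochodnaStep, List.getElem!_eq_getElem?_getD, h, hiw]

-- A-side: k passes compute the falling-factorial formula (k < length)
theorem loopA_spec (k : Nat) : ∀ w : List Int, k < w.length →
    pochodnaLoop w k =
      (List.range (w.length - k)).map (fun i => w[i]! * ff (w.length - 1 - i) k) := by
  induction k with
  | zero =>
    intro w _
    show w = _
    simp only [Nat.sub_zero, ff]
    apply List.ext_getElem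
    · simp
    · intro i h1 h2
      simp_all [List.getElem!_eq_getElem?_getD]
  | succ k ih =>
    intro w hk
    have hn : 2 ≤ w.length := by omega
    have hlen : (pochodnaStep w).length = w.length - 1 := by
      simp [pochodnaStep]
    rw [pochodnaLoop]
    rw [if_neg (by omega)]
    rw [ih (pochodnaStep w) (by omega)]
    rw [hlen]
    apply List.ext_getElem
    · simp; omega
    · intro i h1 h2
      have hi : i < w.length - 1 - k := by simpa using h1
      have hiw : i + 1 < w.length := by omega
      simp only [List.getElem_map, List.getElem_range]
      rw [step_getElem! w i (by omega)]
      rw [show ff (w.length - 1 - i) (k + 1) = ((w.length - 1 - i : Nat) : Int) * ff (w.length - 1 - i - 1) k from rfl]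
      rw [show w.length - 1 - 1 - i = w.length - 1 - i - 1 from by omega]
      rw [show ((w.length - 1 - i : Nat) : Int) = (w.length : Int) - (i : Int) - 1 from by omega]
      ring

-- A-side: once k ≥ length ≥ 1, the loop collapses to [0]
theorem loopA_zero (k : Nat) : ∀ w : List Int, 1 ≤ w.length → w.length ≤ k →
    pochodnaLoop w k = [0] := by
  induction k with
  | zero => intro w h1 h2; omega
  | succ k ih =>
    intro w h1 h2
    rw [pochodnaLoop]
    by_cases h : w.length ≤ 1
    · rw [if_pos h]
    · rw [if_neg h]
      exact ih (pochodnaStep w) (by simp [pochodnaStep]; omega) (by simp [pochodnaStep]; omega)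

-- B-side: the first loop computes ff (n-1) k
theorem prod_pyRange_ff (k : Nat) : ∀ d : Nat, k ≤ d →
    (PySem.List.pyRange ((d : Int) - k + 1) ((d : Int) + 1) 1).foldl (fun f j => f * j) 1
      = ff d k := by
  induction k with
  | zero =>
    intro d _
    rw [PySem.List.pyRange_one_eq_nil (by omega)]
    rfl
  | succ k ih =>
    intro d hk
    rw [show ((d : Int) - (k + 1 : Nat) + 1) = (d : Int) - k by push_cast; ring]
    rw [PySem.List.pyRange_one_succ_right (by omega)]
    rw [List.foldl_append]
    have : (PySem.List.pyRange ((d : Int) - k) ((d : Int)) 1) =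
        (PySem.List.pyRange (((d - 1 : Nat) : Int) - k + 1) (((d - 1 : Nat) : Int) + 1) 1) := by
      congr 1 <;> omega
    rw [this, ih (d - 1) (by omega)]
    show ff (d - 1) k * (d : Int) = ff d (k + 1)
    rw [show ff d (k + 1) = (d : Int) * ff (d - 1) k from rfl]
    ring

-- B-side: the main pass, with invariant f = ff d k, degree d decreasing
theorem loopB_spec (k : Nat) (ys : List Int) : ∀ (d : Nat) (acc : List Int),
    ys.length + k ≤ d + 1 →
    ((ys.foldl
        (fun (st : List Int × Int × Int) c =>
          (st.1 ++ [c * st.2.1],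
           (if st.2.2 > (k : Int) then PySem.Int.floordiv (st.2.1 * (st.2.2 - k)) st.2.2 else st.2.1),
           st.2.2 - 1))
        (acc, ff d k, (d : Int))).1)
      = acc ++ (List.range ys.length).map (fun i => ys[i]! * ff (d - i) k) := by
  induction ys with
  | nil => intro d acc _; simp
  | cons c ys ih =>
    intro d acc hb
    have hb' : ys.length + k ≤ d := by simp only [List.length_cons] at hb; omega
    rw [List.foldl_cons]
    by_cases hdk : (k : Int) < (d : Int)
    · have hd1 : 1 ≤ d := by omega
      have hf : (if (d : Int) > (k : Int) then
            PySem.Int.floordiv (ff d k * ((d : Int) - (k : Nat)) ) (d : Int) else ff d k)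
          = ff (d - 1) k := by
        rw [if_pos hdk]
        rw [← ff_bot k d (by omega)]
        rw [show ff d (k + 1) = (d : Int) * ff (d - 1) k from rfl]
        rw [PySem.Int.floordiv_eq_ediv_of_pos (by omega)]
        exact Int.mul_ediv_cancel_left _ (by omega)
      simp only [hf]
      rw [show (d : Int) - 1 = ((d - 1 : Nat) : Int) from by omega]
      rw [ih (d - 1) (acc ++ [c * ff d k]) (by omega)]
      simp only [List.length_cons]
      rw [List.append_assoc]
      congr 1
      rw [List.range_succ_eq_map]
      simp only [List.map_cons, List.map_map, List.getElem!_cons_zero, Nat.sub_zero,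
        List.singleton_append]
      congr 1
      apply List.map_congr_left
      intro i _
      simp only [Function.comp]
      rw [show (c :: ys)[i + 1]! = ys[i]! from by simp [List.getElem!_eq_getElem?_getD]]
      rw [show d - (i + 1) = d - 1 - i from by omega]
    · have hys : ys = [] := List.eq_nil_of_length_eq_zero (by omega)
      subst hys
      simp

-- ===== VERDICT (by name: the statement is the Claim_ definition above) =====
-- (w.take m)[i]! = w[i]! for i < m
theorem take_getElem! (w : List Int) (m i : Nat) (h : i < m) (hw : i < w.length) :
    (w.take m)[i]! = w[i]! := by
  simp [List.getElem!_eq_getElem?_getD, List.getElem?_take, h, hw]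

theorem pochodna_spec : Claim_equal_pochodna := by
  intro w k _
  unfold Spec_pochodna pochodna pochodna_alt
  by_cases h0 : w = [] ∨ k < 0
  · rw [if_pos h0, if_pos h0]
  · rw [if_neg h0, if_neg h0]
    rw [not_or, not_lt] at h0
    obtain ⟨hw, hk⟩ := h0
    have hn1 : 1 ≤ w.length := List.length_pos_iff.mpr hw
    have hkt : k = (k.toNat : Int) := (Int.toNat_of_nonneg hk).symm
    by_cases hkn : (w.length : Int) ≤ k
    · rw [if_pos hkn]
      rw [loopA_zero k.toNat w hn1 (by omega)]
      simp
    · rw [if_neg hkn]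
      have hklt : k.toNat < w.length := by omega
      -- A side
      rw [loopA_spec k.toNat w hklt]
      have hne : (List.range (w.length - k.toNat)).map
          (fun i => w[i]! * ff (w.length - 1 - i) k.toNat) ≠ [] := by
        simp; omega
      rw [if_neg hne]
      -- B side: slice = take
      rw [PySem.List.slice_to w (by omega : (0:Int) ≤ (w.length : Int) - k)]
      have htn : ((w.length : Int) - k).toNat = w.length - k.toNat := by omega
      rw [htn]
      -- B side: first loop = ff (n-1) k
      have hr : PySem.List.pyRange ((w.length : Int) - k) (w.length : Int) 1
          = PySem.List.pyRange (((w.length - 1 : Nat) : Int) - (k.toNat : Nat) + 1)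
              (((w.length - 1 : Nat) : Int) + 1) 1 := by
        congr 1 <;> omega
      rw [hr, prod_pyRange_ff k.toNat (w.length - 1) (by omega)]
      -- B side: main loop
      have hmain := loopB_spec k.toNat (w.take (w.length - k.toNat)) (w.length - 1) []
        (by simp; omega)
      rw [show ((w.length - 1 : Nat) : Int) = (w.length : Int) - 1 from by omega] at hmain
      rw [show ((k.toNat : Nat) : Int) = k from by omega] at hmain
      rw [hmain]
      have hlt : (w.take (w.length - k.toNat)).length = w.length - k.toNat := by
        simp
      rw [hlt]
      simp only [List.nil_append]
      apply List.map_congr_left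
      intro i hi
      rw [List.mem_range] at hi
      rw [take_getElem! w _ i hi (by omega)]
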